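-- pv_equiv track=rewrite | github.com/googliness/MarkovianRapLyricsGenerator | RapGenerator.py | getTransitionProb
-- ===== SOURCE A (Python) =====
-- def getTransitionProb(rapLib, transProb):
--     currWord = rapLib[0]
--     for i in range(1, len(rapLib)):
--         nextWord = rapLib[i]
--         # if the current word is an unseen word
--         if currWord not in transProb.keys():
--             transProb[currWord] = {}
--             transProb[currWord][nextWord] = 1
--         # if the current word and the next word have not been seen simultaneously before
--         elif nextWord not in transProb[currWord].keys():
--             transProb[currWord][nextWord] = 1
--         else:
--             transProb[currWord][nextWord] += 1
--         currWord = nextWord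
--     return transProb
-- ===== SOURCE B (Python) =====
-- def getTransitionProb(rapLib, transProb):
--     # Two-pass: flat pair-count table first, then fold it into the nested dict.
--     counts = {}
--     for pair in zip(rapLib, rapLib[1:]):
--         counts[pair] = counts.get(pair, 0) + 1
--     for (curr, nxt), c in counts.items():
--         inner = transProb.setdefault(curr, {})
--         inner[nxt] = inner.get(nxt, 0) + c
--     return transProb
-- ===== Notes on version B (the rewrite author's own statement) =====
-- stated objective: alternative
-- what changed: A threads currWord through one pass with three explicit membership branches updating the nested dict per step; B first builds a flat table of adjacent-pair counts with zip, then in a second pass folds each ((curr,next),c) into the nested dict via setdefault/get.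
import Mathlib
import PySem

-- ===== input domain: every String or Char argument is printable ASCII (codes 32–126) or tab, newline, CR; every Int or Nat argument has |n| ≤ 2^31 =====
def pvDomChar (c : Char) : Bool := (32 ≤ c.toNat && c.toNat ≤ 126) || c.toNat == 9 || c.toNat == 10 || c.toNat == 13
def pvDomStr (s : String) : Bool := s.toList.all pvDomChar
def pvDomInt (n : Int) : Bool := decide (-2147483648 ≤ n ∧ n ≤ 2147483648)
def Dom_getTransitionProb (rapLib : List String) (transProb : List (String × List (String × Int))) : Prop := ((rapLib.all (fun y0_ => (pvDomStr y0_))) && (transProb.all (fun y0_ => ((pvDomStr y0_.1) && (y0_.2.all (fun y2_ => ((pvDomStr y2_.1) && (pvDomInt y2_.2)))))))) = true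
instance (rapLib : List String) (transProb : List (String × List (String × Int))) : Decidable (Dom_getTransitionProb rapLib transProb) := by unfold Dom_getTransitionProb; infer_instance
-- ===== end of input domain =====

-- B builds a flat table of adjacent-pair counts first, then folds it into the nested dict in a
-- second pass (A threads currWord through one pass with three membership branches); same return
-- value; both Pythons mutate transProb in place — the equivalence proved is about the return value.


-- the Python argument is a dict of dicts: marshal the association list into PySem.Dict (dict(pairs)
-- semantics) and back; shared input/output conversion, used identically by both ports
def pvToDict (transProb : List (String × List (String × Int))) :
    PySem.Dict String (PySem.Dict String Int) :=
  PySem.Dict.ofList (transProb.map (fun p => (p.1, PySem.Dict.ofList p.2)))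

def pvFromDict (d : PySem.Dict String (PySem.Dict String Int)) :
    List (String × List (String × Int)) :=
  d.items.map (fun p => (p.1, p.2.items))

-- ===== PORT A =====
-- one step of A's loop body: the three membership branches, in A's order
def pvStepA (d : PySem.Dict String (PySem.Dict String Int)) (currWord nextWord : String) :
    PySem.Dict String (PySem.Dict String Int) :=
  if d.contains currWord = false then
    -- transProb[currWord] = {}; transProb[currWord][nextWord] = 1
    d.insert currWord ((PySem.Dict.mk []).insert nextWord 1)
  else if (d.getD currWord (PySem.Dict.mk [])).contains nextWord = false then
    -- transProb[currWord][nextWord] = 1  (inner dict mutated in place)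
    d.modify currWord (PySem.Dict.mk []) (fun inner => inner.insert nextWord 1)
  else
    -- transProb[currWord][nextWord] += 1
    d.modify currWord (PySem.Dict.mk []) (fun inner => inner.modify nextWord 0 (· + 1))

def getTransitionProb (rapLib : List String) (transProb : List (String × List (String × Int))) : List (String × List (String × Int)) :=
  match PySem.List.pyGet? rapLib 0 with
  | none => []  -- rapLib[0] raises IndexError; excluded by Pre_getTransitionProb
  | some w0 =>
    -- for i in range(1, len(rapLib)): nextWord = rapLib[i]; …; currWord = nextWord
    let st := (PySem.List.pyRange 1 (PySem.List.len rapLib)).foldl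
      (fun (st : PySem.Dict String (PySem.Dict String Int) × String) i =>
        let nextWord := PySem.List.pyGetD rapLib i ""  -- i is in range throughout the loop: exact
        (pvStepA st.1 st.2 nextWord, nextWord))
      (pvToDict transProb, w0)
    pvFromDict st.1

-- ===== PORT B =====
def getTransitionProb_alt (rapLib : List String) (transProb : List (String × List (String × Int))) : List (String × List (String × Int)) :=
  -- counts[pair] = counts.get(pair, 0) + 1  over zip(rapLib, rapLib[1:])
  let counts := (rapLib.zip (PySem.List.slice rapLib (some 1))).foldl
    (fun d pair => d.insert pair (d.getD pair 0 + 1)) PySem.Dict.empty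
  -- for (curr, nxt), c in counts.items(): inner = transProb.setdefault(curr, {});
  --   inner[nxt] = inner.get(nxt, 0) + c      (setdefault-then-assign ≡ Dict.modify with default {})
  let d := counts.items.foldl
    (fun d pc => d.modify pc.1.1 (PySem.Dict.mk [])
      (fun inner => inner.insert pc.1.2 (inner.getD pc.1.2 0 + pc.2)))
    (pvToDict transProb)
  pvFromDict d

-- ===== PRECONDITION & SPEC =====
-- Pre_ excludes only the empty word list, on which A raises IndexError at rapLib[0]
def Pre_getTransitionProb (rapLib : List String) (transProb : List (String × List (String × Int))) : Prop := rapLib ≠ []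
instance (rapLib : List String) (transProb : List (String × List (String × Int))) : Decidable (Pre_getTransitionProb rapLib transProb) := by unfold Pre_getTransitionProb; infer_instance
def pvWitness_getTransitionProb : List String × (List (String × List (String × Int))) :=
  (["a", "b", "a", "b"], [("a", [("c", 2)])])

def Spec_getTransitionProb (rapLib : List String) (transProb : List (String × List (String × Int))) (out : List (String × List (String × Int))) : Prop := out = getTransitionProb_alt rapLib transProb
instance (rapLib : List String) (transProb : List (String × List (String × Int))) (out : List (String × List (String × Int))) : Decidable (Spec_getTransitionProb rapLib transProb out) := by unfold Spec_getTransitionProb; infer_instance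

-- ===== CLAIM (what is proved, stated in full; the proofs are below) =====
def Claim_equal_getTransitionProb : Prop := ∀ (rapLib : List String) (transProb : List (String × List (String × Int))), Dom_getTransitionProb rapLib transProb → Pre_getTransitionProb rapLib transProb → Spec_getTransitionProb rapLib transProb (getTransitionProb rapLib transProb)
-- ===== LEMMAS AND PROOFS =====

-- `pvBump n d p`: add n to the count of pair p in the nested dict (creating keys as Python does);
-- both A's loop step and B's merge step are instances of it
def pvBump (n : Int) (d : PySem.Dict String (PySem.Dict String Int)) (p : String × String) :
    PySem.Dict String (PySem.Dict String Int) :=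
  d.modify p.1 (PySem.Dict.mk []) (fun inner => inner.modify p.2 0 (· + n))

-- both keys of pair p already present in the nested dict
def pvFull (d : PySem.Dict String (PySem.Dict String Int)) (p : String × String) : Prop :=
  d.contains p.1 = true ∧ (d.getD p.1 (PySem.Dict.mk [])).contains p.2 = true

theorem pv_rep_key {κ ν : Type} [BEq κ] [LawfulBEq κ] (l : List (κ × ν)) (k' j : κ) (v' : ν) :
    (l.map (fun p => if (p.1 == k') = true then (k', v') else p)).any (fun p => p.1 == j)
      = l.any (fun p => p.1 == j) := by
  induction l with
  | nil => rfl
  | cons p t ih =>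
    by_cases h : p.1 = k' <;> simp_all

-- inserting at a key already present commutes (as items lists) with inserting at any other key
theorem pv_insert_comm {κ ν : Type} [BEq κ] [LawfulBEq κ] (d : PySem.Dict κ ν)
    (k k' : κ) (v v' : ν) (hne : k ≠ k') (hk : d.contains k = true) :
    (d.insert k' v').insert k v = (d.insert k v).insert k' v' := by
  have hk0 : d.items.any (fun p => p.1 == k) = true := hk
  by_cases hk' : d.contains k' = true
  · rw [show d.insert k' v' = ⟨d.items.map (fun p => if (p.1 == k') = true then (k', v') else p)⟩
        from by simp [PySem.Dict.insert, hk'],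
        show d.insert k v = ⟨d.items.map (fun p => if (p.1 == k) = true then (k, v) else p)⟩
        from by simp [PySem.Dict.insert, hk]]
    have hk0' : d.items.any (fun p => p.1 == k') = true := hk'
    have c1 : (PySem.Dict.mk (d.items.map (fun p => if (p.1 == k') = true then (k', v') else p)) : PySem.Dict κ ν).contains k = true := by
      show (d.items.map _).any _ = true
      rw [pv_rep_key]; exact hk0
    have c2 : (PySem.Dict.mk (d.items.map (fun p => if (p.1 == k) = true then (k, v) else p)) : PySem.Dict κ ν).contains k' = true := by
      show (d.items.map _).any _ = true
      rw [pv_rep_key]; exact hk0'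
    simp only [PySem.Dict.insert, c1, c2, if_pos]
    apply PySem.Dict.ext
    simp only [List.map_map]
    apply List.map_congr_left
    intro p _
    by_cases h1 : p.1 = k <;> by_cases h2 : p.1 = k' <;>
      simp_all [Function.comp, Ne.symm hne]
  · have hk'b : d.contains k' = false := by simp_all
    have hk0' : d.items.any (fun p => p.1 == k') = false := hk'b
    rw [show d.insert k' v' = ⟨d.items ++ [(k', v')]⟩
        from by simp [PySem.Dict.insert, hk'b],
        show d.insert k v = ⟨d.items.map (fun p => if (p.1 == k) = true then (k, v) else p)⟩
        from by simp [PySem.Dict.insert, hk]]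
    have c1 : (PySem.Dict.mk (d.items ++ [(k', v')]) : PySem.Dict κ ν).contains k = true := by
      show (d.items ++ [(k', v')]).any _ = true
      simp [List.any_append, hk0]
    have c2 : (PySem.Dict.mk (d.items.map (fun p => if (p.1 == k) = true then (k, v) else p)) : PySem.Dict κ ν).contains k' = false := by
      show (d.items.map _).any _ = false
      rw [pv_rep_key]; exact hk0'
    simp only [PySem.Dict.insert, c1, c2, if_pos]
    simp only [Bool.false_eq_true, if_false]
    apply PySem.Dict.ext
    simp [List.map_append, Ne.symm hne]

theorem pv_modify_comm {κ ν : Type} [BEq κ] [LawfulBEq κ] (d : PySem.Dict κ ν)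
    (k k' : κ) (d0 d0' : ν) (f g : ν → ν) (hne : k ≠ k') (hk : d.contains k = true) :
    (d.modify k' d0' g).modify k d0 f = (d.modify k d0 f).modify k' d0' g := by
  simp only [PySem.Dict.modify]
  rw [PySem.Dict.getD_insert_of_ne _ _ _ hne, PySem.Dict.getD_insert_of_ne _ _ _ (Ne.symm hne)]
  exact pv_insert_comm d k k' _ _ hne hk

theorem pvFull_bump (d : PySem.Dict String (PySem.Dict String Int)) (p q : String × String)
    (h : pvFull d p) (n : Int) : pvFull (pvBump n d q) p := by
  obtain ⟨h1, h2⟩ := h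
  by_cases hq : p.1 = q.1
  · constructor
    · simp [pvBump, PySem.Dict.contains_modify, h1]
    · rw [hq] at h2
      simp only [pvBump, hq, PySem.Dict.getD_modify_self]
      simp [PySem.Dict.contains_modify, h2]
  · constructor
    · simp [pvBump, PySem.Dict.contains_modify, h1]
    · simp only [pvBump]
      rw [PySem.Dict.getD_modify_of_ne _ _ _ hq]
      exact h2

theorem pvFull_bump_self (d : PySem.Dict String (PySem.Dict String Int)) (p : String × String)
    (n : Int) : pvFull (pvBump n d p) p := by
  constructor
  · simp [pvBump, PySem.Dict.contains_modify]
  · simp only [pvBump, PySem.Dict.getD_modify_self]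
    simp [PySem.Dict.contains_modify]

-- bumps of two distinct pairs commute once the first pair's keys exist
theorem pvBump_comm (d : PySem.Dict String (PySem.Dict String Int)) (p q : String × String)
    (hne : p ≠ q) (hp : pvFull d p) (m n : Int) :
    pvBump n (pvBump m d q) p = pvBump m (pvBump n d p) q := by
  by_cases h1 : p.1 = q.1
  · have h2 : p.2 ≠ q.2 := by
      intro h2; exact hne (Prod.ext h1 h2)
    have outer : ∀ (f g : PySem.Dict String Int → PySem.Dict String Int),
        (d.modify p.1 (PySem.Dict.mk []) g).modify p.1 (PySem.Dict.mk []) f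
          = d.insert p.1 (f (g (d.getD p.1 (PySem.Dict.mk [])))) := by
      intro f g
      simp only [PySem.Dict.modify, PySem.Dict.getD_insert_self, PySem.Dict.insert_insert_self]
    simp only [pvBump, ← h1, outer]
    congr 1
    exact pv_modify_comm _ p.2 q.2 0 0 _ _ h2 hp.2
  · exact pv_modify_comm d p.1 q.1 _ _ _ _ h1 hp.1

theorem pvBump_bump_self (d : PySem.Dict String (PySem.Dict String Int)) (p : String × String)
    (m n : Int) : pvBump n (pvBump m d p) p = pvBump (m + n) d p := by
  simp only [pvBump, PySem.Dict.modify, PySem.Dict.getD_insert_self,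
    PySem.Dict.insert_insert_self, PySem.Dict.getD_insert_self]
  congr 2
  omega

theorem pv_rep (n : Nat) (m : Int) (d : PySem.Dict String (PySem.Dict String Int))
    (p : String × String) :
    (List.replicate n p).foldl (fun d x => pvBump 1 d x) (pvBump m d p) = pvBump (m + n) d p := by
  induction n generalizing m with
  | zero => simp
  | succ k ih =>
    rw [List.replicate_succ, List.foldl_cons, pvBump_bump_self, ih]
    congr 1
    omega

theorem pv_rep_comm (n : Nat) (d : PySem.Dict String (PySem.Dict String Int))
    (p q : String × String) (hne : q ≠ p) (hp : pvFull d p) :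
    (List.replicate n p).foldl (fun d x => pvBump 1 d x) (pvBump 1 d q)
      = pvBump 1 ((List.replicate n p).foldl (fun d x => pvBump 1 d x) d) q := by
  induction n generalizing d with
  | zero => simp
  | succ k ih =>
    rw [List.replicate_succ, List.foldl_cons, List.foldl_cons]
    rw [pvBump_comm d p q (Ne.symm hne) hp 1 1]
    exact ih (pvBump 1 d p) (pvFull_bump_self d p 1)

-- once pair p's keys exist, all later occurrences of p can be pulled to the front of the fold
theorem pv_pull (t : List (String × String)) (d : PySem.Dict String (PySem.Dict String Int))
    (p : String × String) (h : pvFull d p) :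
    t.foldl (fun d x => pvBump 1 d x) d
      = (t.filter (fun q => q ≠ p)).foldl (fun d x => pvBump 1 d x)
          ((List.replicate (t.count p) p).foldl (fun d x => pvBump 1 d x) d) := by
  induction t generalizing d with
  | nil => simp
  | cons q r ih =>
    by_cases hq : q = p
    · subst hq
      rw [List.filter_cons_of_neg (by simp)]
      rw [List.count_cons_self, List.replicate_succ, List.foldl_cons, List.foldl_cons]
      exact ih (pvBump 1 d q) (pvFull_bump_self d q 1)
    · simp only [List.foldl_cons, List.filter_cons]
      rw [List.count_cons_of_ne hq]
      have hd : (decide (q ≠ p)) = true := by simp [hq]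
      rw [hd]
      simp only [if_true, List.foldl_cons]
      rw [ih (pvBump 1 d q) (pvFull_bump d p q h 1)]
      rw [pv_rep_comm (r.count p) d p q hq h]

theorem pv_foldl_add_mem {α : Type} [BEq α] [LawfulBEq α] [DecidableEq α]
    (t : List α) (s : PySem.Set α) (p : α) (h : p ∈ s) :
    t.foldl PySem.Set.add s = (t.filter (fun q => q ≠ p)).foldl PySem.Set.add s := by
  induction t generalizing s with
  | nil => rfl
  | cons q r ih =>
    by_cases hq : q = p
    · subst hq
      rw [List.filter_cons_of_neg (by simp), List.foldl_cons, PySem.Set.add_of_mem h]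
      exact ih s h
    · rw [List.filter_cons_of_pos (by simp [hq]), List.foldl_cons, List.foldl_cons]
      have hm : p ∈ s.add q := by
        rw [PySem.Set.mem_add]
        exact Or.inl h
      exact ih _ hm

theorem pv_foldl_add_cons {α : Type} [BEq α] [LawfulBEq α]
    (t : List α) (s : List α) (p : α) (h : p ∉ t) :
    t.foldl PySem.Set.add (p :: s) = p :: t.foldl PySem.Set.add s := by
  induction t generalizing s with
  | nil => rfl
  | cons q r ih =>
    have hqp : q ≠ p := fun e => h (e ▸ List.mem_cons_self)
    have h' : p ∉ r := fun e => h (List.mem_cons_of_mem _ e)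
    rw [List.foldl_cons, List.foldl_cons]
    have e : PySem.Set.add (p :: s) q = p :: PySem.Set.add s q := by
      by_cases hs : q ∈ s
      · rw [PySem.Set.add_of_mem hs, PySem.Set.add_of_mem (List.mem_cons_of_mem _ hs)]
      · have hn : q ∉ p :: s := by simp [hqp, hs]
        rw [PySem.Set.add_of_not_mem hs, PySem.Set.add_of_not_mem hn]
        rfl
    rw [e, ih _ h']

theorem pv_ofList_cons {α : Type} [BEq α] [LawfulBEq α] [DecidableEq α] (p : α) (t : List α) :
    PySem.Set.ofList (p :: t) = p :: PySem.Set.ofList (t.filter (fun q => q ≠ p)) := by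
  show (p :: t).foldl PySem.Set.add PySem.Set.empty = _
  rw [List.foldl_cons]
  have e1 : PySem.Set.add PySem.Set.empty p = [p] := rfl
  rw [e1, pv_foldl_add_mem t [p] p (by simp)]
  exact pv_foldl_add_cons _ [] p (by simp)

-- the heart of the equivalence: folding +1 per occurrence (A) equals folding the grouped
-- counts in first-occurrence order (B)
theorem pv_main_aux (n : Nat) :
    ∀ (l : List (String × String)) (d : PySem.Dict String (PySem.Dict String Int)),
    l.length ≤ n →
    l.foldl (fun d x => pvBump 1 d x) d
      = ((PySem.Set.ofList l).map (fun k => (k, (l.count k : Int)))).foldl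
          (fun d pc => pvBump pc.2 d pc.1) d := by
  induction n with
  | zero =>
    intro l d h
    rw [List.length_eq_zero_iff.mp (Nat.le_zero.mp h)]
    rfl
  | succ n ih =>
    intro l d h
    match l with
    | [] => rfl
    | p :: t =>
      have hlen : t.length ≤ n := by simpa using h
      have hlen' : (t.filter (fun q => q ≠ p)).length ≤ n :=
        le_trans (List.length_filter_le _ _) hlen
      rw [List.foldl_cons,
          pv_pull t (pvBump 1 d p) p (pvFull_bump_self d p 1),
          pv_rep, ih _ _ hlen', pv_ofList_cons]
      simp only [List.map_cons, List.foldl_cons, List.count_cons_self]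
      have hhead : pvBump (1 + (t.count p : Int)) d p = pvBump ((t.count p + 1 : Nat) : Int) d p := by
        congr 1
        push_cast
        ring
      rw [hhead]
      congr 1
      apply List.map_congr_left
      intro k hk
      have hk' : k ∈ t.filter (fun q => q ≠ p) := (PySem.Set.mem_ofList _ _).mp hk
      have hkp : k ≠ p := by
        have := (List.mem_filter.mp hk').2
        simpa using this
      have hc : (t.filter (fun q => q ≠ p)).count k = t.count k :=
        List.count_filter (by simp [hkp])
      rw [List.count_cons_of_ne (Ne.symm hkp), hc]

-- A's three branches are exactly one `pvBump 1`
theorem pvStepA_eq_bump (d : PySem.Dict String (PySem.Dict String Int)) (c n : String) :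
    pvStepA d c n = pvBump 1 d (c, n) := by
  unfold pvStepA pvBump
  by_cases h1 : d.contains c = true
  · simp only [h1, Bool.true_eq_false, if_false]
    by_cases h2 : (d.getD c (PySem.Dict.mk [])).contains n = true
    · simp [h2]
    · have h2' : (d.getD c (PySem.Dict.mk [])).contains n = false := by simp_all
      simp only [h2', if_true]
      simp only [PySem.Dict.modify, PySem.Dict.getD_of_not_contains _ _ h2']
      norm_num
  · have h1' : d.contains c = false := by simp_all
    simp only [h1', if_true]
    simp only [PySem.Dict.modify, PySem.Dict.getD_of_not_contains _ _ h1']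
    simp [PySem.Dict.getD, PySem.Dict.get?]

-- A's index-threading loop over positions 1..n-1 is the pair fold over zip
theorem pv_thread (rest : List String) (w : String)
    (d : PySem.Dict String (PySem.Dict String Int)) :
    (rest.foldl (fun (st : PySem.Dict String (PySem.Dict String Int) × String) n =>
        (pvStepA st.1 st.2 n, n)) (d, w)).1
      = ((w :: rest).zip rest).foldl (fun d p => pvStepA d p.1 p.2) d := by
  induction rest generalizing w d with
  | nil => rfl
  | cons n r ih =>
    simp only [List.zip_cons_cons, List.foldl_cons]
    exact ih n (pvStepA d w n)

-- ===== VERDICT (by name: the statement is the Claim_ definition above) =====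
theorem getTransitionProb_spec : Claim_equal_getTransitionProb := by
  intro rapLib transProb _ hpre
  unfold Spec_getTransitionProb
  match rapLib with
  | [] => exact absurd rfl hpre
  | w0 :: rest =>
    unfold getTransitionProb getTransitionProb_alt
    rw [show PySem.List.pyGet? (w0 :: rest) 0 = some w0 from by
      simp [PySem.List.pyGet?, PySem.List.pyIdx?]]
    simp only []
    rw [show PySem.List.slice (w0 :: rest) (some 1) = rest from by
      rw [PySem.List.slice_from _ (by norm_num)]; rfl]
    rw [PySem.List.foldl_pyRange_pyGetD (w0 :: rest) ""
      (fun (st : PySem.Dict String (PySem.Dict String Int) × String) n => (pvStepA st.1 st.2 n, n))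
      (pvToDict transProb, w0) (by norm_num : (0:Int) ≤ 1)]
    rw [show List.drop (1:Int).toNat (w0 :: rest) = rest from rfl]
    rw [pv_thread rest w0 (pvToDict transProb)]
    rw [PySem.Dict.foldl_insert_getD_add_one_eq_counter, PySem.Dict.items_counter]
    have hfunB : (fun (d : PySem.Dict String (PySem.Dict String Int))
        (pc : (String × String) × Int) => d.modify pc.1.1 (PySem.Dict.mk [])
          (fun inner => inner.insert pc.1.2 (inner.getD pc.1.2 0 + pc.2)))
        = (fun d pc => pvBump pc.2 d pc.1) := rfl
    rw [hfunB]
    have hfunA : (fun (d : PySem.Dict String (PySem.Dict String Int)) (p : String × String) =>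
        pvStepA d p.1 p.2) = (fun d p => pvBump 1 d p) := by
      funext d p
      rw [pvStepA_eq_bump]
    rw [hfunA]
    rw [pv_main_aux (((w0 :: rest).zip rest).length) _ _ (le_refl _)]
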